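-- pv_equiv track=rewrite | github.com/saran9991/Lufthansa-Arrival-Time-Prediction | src/train/train_vanilla_dl.py | calc_layers
-- ===== SOURCE A (Python) =====
-- def calc_layers(exponent, n_layers):
--     initial_neurons = 2 ** round(exponent)  # Calculate initial neuron count
--     layers = [initial_neurons]  # List to hold the neuron counts for each layer
--
--     # Add subsequent layers, halving neuron count each time
--     for _ in range(1, round(n_layers)):
--         next_layer_neurons = layers[-1] // 2  # Halve the neuron count
--
--         # Check if the neuron count is below the minimum (2)
--         if next_layer_neurons < 2:
--             break
--
--         layers.append(next_layer_neurons)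
--
--     return tuple(layers)
-- ===== SOURCE B (Python) =====
-- def calc_layers(exponent, n_layers):
--     e = round(exponent)
--     n = round(n_layers)
--     # closed-form layer count: halvings stay >= 2 while e - i >= 1
--     extra = min(max(n - 1, 0), max(e - 1, 0))
--     first = 1 << e
--     return tuple(first >> i for i in range(extra + 1))
-- ===== Notes on version B (the rewrite author's own statement) =====
-- stated objective: alternative
-- what changed: Replaces the break-terminated halving loop (repeated // 2 with list mutation) by a closed-form layer count extra = min(max(n-1,0), max(e-1,0)) and one comprehension of bit-shifts (1 << e) >> i; intended as faster, measured 1.66x at the largest size but unconfirmed (B ran out of memory where A timed out).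
-- outside the precondition, e.g. on calc_layers(-1, 3): A returns (0.5,), B raises ValueError
import Mathlib
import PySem

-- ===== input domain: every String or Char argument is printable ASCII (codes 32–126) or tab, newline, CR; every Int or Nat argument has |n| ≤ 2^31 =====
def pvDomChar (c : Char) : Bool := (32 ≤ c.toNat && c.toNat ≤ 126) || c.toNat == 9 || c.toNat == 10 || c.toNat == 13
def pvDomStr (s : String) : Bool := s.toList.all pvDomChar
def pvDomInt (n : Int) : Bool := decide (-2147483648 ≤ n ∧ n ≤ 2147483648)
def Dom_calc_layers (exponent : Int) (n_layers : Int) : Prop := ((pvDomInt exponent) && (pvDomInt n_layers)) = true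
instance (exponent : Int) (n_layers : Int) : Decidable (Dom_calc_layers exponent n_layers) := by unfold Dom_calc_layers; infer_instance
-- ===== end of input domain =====

-- B replaces A's break-terminated halving loop by a closed-form layer count plus one map of bit-shifts (objective: alternative).

-- ===== PORT A =====
-- the for-loop with break, as structural recursion on the remaining iteration count of range(1, n_layers);
-- layers[-1] via PySem.List.pyGet? (the list is never empty, so the .getD 0 default is never used)
def calcLayersLoopA : Nat → List Int → List Int
  | 0, layers => layers
  | k + 1, layers =>
      let next := PySem.Int.floordiv ((PySem.List.pyGet? layers (-1)).getD 0) 2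
      if next < 2 then layers
      else calcLayersLoopA k (layers ++ [next])

-- 2 ** round(exponent): exact for exponent ≥ 0 (Pre_); Python yields a float for negative exponent, excluded by Pre_
def calc_layers (exponent : Int) (n_layers : Int) : List Int :=
  let initial_neurons : Int := 2 ^ exponent.toNat
  calcLayersLoopA (n_layers - 1).toNat [initial_neurons]

-- ===== PORT B =====
-- extra = min(max(n_layers-1,0), max(exponent-1,0)) and first = 1 << exponent, inlined;
-- 1 << e and >> ported as Int shifts on the Nat exponent (exact for exponent ≥ 0, which Pre_ guarantees;
-- Python raises ValueError for a negative shift, excluded by Pre_)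
def calc_layers_alt (exponent : Int) (n_layers : Int) : List Int :=
  (List.range ((min (max (n_layers - 1) 0) (max (exponent - 1) 0)).toNat + 1)).map
    (fun (i : Nat) => ((1 : Int) <<< exponent.toNat) >>> i)

-- ===== PRECONDITION & SPEC =====
-- Pre_ excludes negative exponents, where Python A returns a tuple of floats (2**-1 == 0.5), not ints (B raises ValueError there).
def Pre_calc_layers (exponent : Int) (n_layers : Int) : Prop := 0 ≤ exponent
instance (exponent : Int) (n_layers : Int) : Decidable (Pre_calc_layers exponent n_layers) := by unfold Pre_calc_layers; infer_instance
def pvWitness_calc_layers : Int × Int := (3, 5)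
def Spec_calc_layers (exponent : Int) (n_layers : Int) (out : List Int) : Prop := out = calc_layers_alt exponent n_layers
instance (exponent : Int) (n_layers : Int) (out : List Int) : Decidable (Spec_calc_layers exponent n_layers out) := by unfold Spec_calc_layers; infer_instance

-- ===== CLAIM (what is proved, stated in full; the proofs are below) =====
def Claim_equal_calc_layers : Prop := ∀ (exponent : Int) (n_layers : Int), Dom_calc_layers exponent n_layers → Pre_calc_layers exponent n_layers → Spec_calc_layers exponent n_layers (calc_layers exponent n_layers)

-- ===== LEMMAS AND PROOFS =====

-- A's loop, started on a list ending in 2^m, appends exactly min k (m-1) further halvings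
theorem calcLayersLoopA_eq (k : Nat) : ∀ (m : Nat) (acc : List Int),
    calcLayersLoopA k (acc ++ [(2 : Int) ^ m]) =
      (acc ++ [(2 : Int) ^ m]) ++ (List.range (min k (m - 1))).map (fun i => (2 : Int) ^ (m - 1 - i)) := by
  induction k with
  | zero => intro m acc; simp [calcLayersLoopA]
  | succ k ih =>
    intro m acc
    have hget : (PySem.List.pyGet? (acc ++ [(2 : Int) ^ m]) (-1)).getD 0 = (2 : Int) ^ m := by
      simp [pysem]
    match m with
    | 0 =>
      simp [calcLayersLoopA, PySem.Int.floordiv]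
    | 1 =>
      simp [calcLayersLoopA, PySem.Int.floordiv]
    | (s + 2) =>
      have hnext : PySem.Int.floordiv ((2 : Int) ^ (s + 2)) 2 = (2 : Int) ^ (s + 1) := by
        rw [PySem.Int.floordiv_eq_ediv_of_pos (by norm_num)]
        rw [pow_succ]
        exact Int.mul_ediv_cancel _ (by norm_num)
      have hge : ¬ ((2 : Int) ^ (s + 1) < 2) := by
        push Not
        calc (2 : Int) = 2 ^ 1 := (pow_one 2).symm
        _ ≤ 2 ^ (s + 1) := pow_le_pow_right₀ (by norm_num) (by omega)
      simp only [calcLayersLoopA, hget, hnext, if_neg hge]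
      have := ih (s + 1) (acc ++ [(2 : Int) ^ (s + 2)])
      rw [this]
      have hmin : min (k + 1) (s + 2 - 1) = min k (s + 1 - 1) + 1 := by omega
      rw [hmin, List.range_succ_eq_map]
      simp [List.append_assoc]

theorem calc_layers_spec_aux (exponent n_layers : Int) (he : 0 ≤ exponent) :
    calc_layers exponent n_layers = calc_layers_alt exponent n_layers := by
  unfold calc_layers calc_layers_alt
  have h0 := calcLayersLoopA_eq (n_layers - 1).toNat exponent.toNat []
  simp only [List.nil_append] at h0
  rw [h0]
  have hsh : ∀ i : Nat, i ≤ exponent.toNat →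
      ((1 : Int) <<< exponent.toNat) >>> i = 2 ^ (exponent.toNat - i) := by
    intro i hi
    rw [show (1 : Int) <<< exponent.toNat = 2 ^ exponent.toNat by simp [Int.shiftLeft_eq]]
    simp only [Int.shiftRight_eq_div_pow]
    rw [← pow_sub_mul_pow (2 : Int) hi]
    exact Int.mul_ediv_cancel _ (by positivity)
  have hmin : (min (max (n_layers - 1) 0) (max (exponent - 1) 0)).toNat
      = min (n_layers - 1).toNat (exponent.toNat - 1) := by omega
  rw [hmin, List.range_succ_eq_map]
  simp only [List.map_cons, List.map_map, List.singleton_append]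
  congr 1
  · rw [hsh 0 (by omega)]
    simp
  · apply List.map_congr_left
    intro i hi
    simp only [List.mem_range] at hi
    simp only [Function.comp]
    rw [hsh (i + 1) (by omega)]
    congr 1
    omega

-- ===== VERDICT (by name: the statement is the Claim_ definition above) =====
theorem calc_layers_spec : Claim_equal_calc_layers := by
  intro exponent n_layers _ hpre
  exact calc_layers_spec_aux exponent n_layers hpre
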